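-- pv_equiv track=rewrite | github.com/sanjibani/value-investing-agents | src/scrapers/data_collector.py | _classify_announcement
-- ===== SOURCE A (Python) =====
-- from typing import List, Dict
--
-- def _classify_announcement(announcement: Dict) -> str:
--     """Classify announcement type"""
--     subject = announcement.get('subject', '').lower()
--
--     if any(word in subject for word in ['merger', 'amalgamation']):
--         return 'merger_arb'
--     elif any(word in subject for word in ['demerger', 'spinoff']):
--         return 'spinoff'
--     elif 'buyback' in subject:
--         return 'buyback'
--     elif 'delisting' in subject:
--         return 'delisting'
--     elif any(word in subject for word in ['rights', 'preferential', 'qip']):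
--         return 'capital_raise'
--     elif 'nclt' in subject:
--         return 'distressed_debt'
--     else:
--         return 'corporate_action'
-- ===== SOURCE B (Python) =====
-- from typing import Dict
--
-- # Flat keyword -> (priority, label) map; classification = label of the
-- # minimum-priority keyword occurring in the subject (no ordered ladder,
-- # no early exit: every keyword is tested and the best match wins).
-- _KEYWORD_PRIORITY = {
--     'merger': (0, 'merger_arb'),
--     'amalgamation': (0, 'merger_arb'),
--     'demerger': (1, 'spinoff'),
--     'spinoff': (1, 'spinoff'),
--     'buyback': (2, 'buyback'),
--     'delisting': (3, 'delisting'),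
--     'rights': (4, 'capital_raise'),
--     'preferential': (4, 'capital_raise'),
--     'qip': (4, 'capital_raise'),
--     'nclt': (5, 'distressed_debt'),
-- }
--
-- def _classify_announcement(announcement: Dict) -> str:
--     """Classify announcement type"""
--     subject = announcement.get('subject', '').lower()
--     best = (6, 'corporate_action')
--     for kw, pl in _KEYWORD_PRIORITY.items():
--         if kw in subject and pl[0] < best[0]:
--             best = pl
--     return best[1]
-- ===== Notes on version B (the rewrite author's own statement) =====
-- stated objective: alternative
-- what changed: Replaces the ordered if/elif ladder (first matching group wins, early return) with a flat keyword->(priority,label) map and a min-priority accumulator: every keyword is tested against the subject and the label of the lowest-priority match (default corporate_action) is returned.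
import Mathlib
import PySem

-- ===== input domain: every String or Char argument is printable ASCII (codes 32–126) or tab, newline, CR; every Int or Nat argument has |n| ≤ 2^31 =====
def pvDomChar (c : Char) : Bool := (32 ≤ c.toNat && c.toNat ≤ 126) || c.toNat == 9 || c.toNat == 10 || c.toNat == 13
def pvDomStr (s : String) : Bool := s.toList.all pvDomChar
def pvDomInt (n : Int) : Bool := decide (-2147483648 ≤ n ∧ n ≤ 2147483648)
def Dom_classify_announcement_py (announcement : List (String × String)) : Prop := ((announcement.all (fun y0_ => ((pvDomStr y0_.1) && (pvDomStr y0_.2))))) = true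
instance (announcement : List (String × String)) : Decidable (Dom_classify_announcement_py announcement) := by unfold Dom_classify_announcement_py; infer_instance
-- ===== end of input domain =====

-- B replaces A's ordered first-match ladder by a flat keyword→(priority,label) map and a
-- min-priority accumulator over all matches (objective: alternative; same cost).

-- ===== PORT A =====
-- Port of A: lowercase the subject, then the if/elif ladder of keyword membership tests.
def classify_announcement_py (announcement : List (String × String)) : String :=
  let subject := PySem.Str.lower ((PySem.Dict.mk announcement).getD "subject" "")
  if ["merger", "amalgamation"].any (fun word => PySem.Str.isIn word subject) then "merger_arb"
  else if ["demerger", "spinoff"].any (fun word => PySem.Str.isIn word subject) then "spinoff"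
  else if PySem.Str.isIn "buyback" subject then "buyback"
  else if PySem.Str.isIn "delisting" subject then "delisting"
  else if ["rights", "preferential", "qip"].any (fun word => PySem.Str.isIn word subject) then "capital_raise"
  else if PySem.Str.isIn "nclt" subject then "distressed_debt"
  else "corporate_action"

-- ===== PORT B =====
-- B's flat keyword → (priority, label) table, in dict insertion order, as in Source B.
def pvKeywordPriority : List (String × (Int × String)) :=
  [("merger", (0, "merger_arb")),
   ("amalgamation", (0, "merger_arb")),
   ("demerger", (1, "spinoff")),
   ("spinoff", (1, "spinoff")),
   ("buyback", (2, "buyback")),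
   ("delisting", (3, "delisting")),
   ("rights", (4, "capital_raise")),
   ("preferential", (4, "capital_raise")),
   ("qip", (4, "capital_raise")),
   ("nclt", (5, "distressed_debt"))]

-- B's loop: fold over all keywords keeping the lowest-priority match.
def classify_announcement_py_alt (announcement : List (String × String)) : String :=
  let subject := PySem.Str.lower ((PySem.Dict.mk announcement).getD "subject" "")
  (pvKeywordPriority.foldl
    (fun best kwpl =>
      if PySem.Str.isIn kwpl.1 subject ∧ kwpl.2.1 < best.1 then kwpl.2 else best)
    ((6 : Int), "corporate_action")).2

-- ===== PRECONDITION & SPEC =====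
def Spec_classify_announcement_py (announcement : List (String × String)) (out : String) : Prop := out = classify_announcement_py_alt announcement
instance (announcement : List (String × String)) (out : String) : Decidable (Spec_classify_announcement_py announcement out) := by unfold Spec_classify_announcement_py; infer_instance

-- ===== CLAIM =====
def Claim_equal_classify_announcement_py : Prop := ∀ (announcement : List (String × String)), Dom_classify_announcement_py announcement → Spec_classify_announcement_py announcement (classify_announcement_py announcement)

-- ===== LEMMAS AND PROOFS =====

-- For any subject, A's branch ladder and B's min-priority fold coincide: case-split on the
-- ten atomic membership tests and evaluate both sides.
theorem ladder_eq_fold (s : String) :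
    (if ["merger", "amalgamation"].any (fun word => PySem.Str.isIn word s) then "merger_arb"
     else if ["demerger", "spinoff"].any (fun word => PySem.Str.isIn word s) then "spinoff"
     else if PySem.Str.isIn "buyback" s then "buyback"
     else if PySem.Str.isIn "delisting" s then "delisting"
     else if ["rights", "preferential", "qip"].any (fun word => PySem.Str.isIn word s) then "capital_raise"
     else if PySem.Str.isIn "nclt" s then "distressed_debt"
     else "corporate_action")
    = (pvKeywordPriority.foldl
        (fun best kwpl =>
          if PySem.Str.isIn kwpl.1 s ∧ kwpl.2.1 < best.1 then kwpl.2 else best)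
        ((6 : Int), "corporate_action")).2 := by
  cases h1 : PySem.Str.isIn "merger" s
  case true => simp_all [pvKeywordPriority]
  case false =>
    cases h2 : PySem.Str.isIn "amalgamation" s
    case true => simp_all [pvKeywordPriority]
    case false =>
      cases h3 : PySem.Str.isIn "demerger" s
      case true => simp_all [pvKeywordPriority]
      case false =>
        cases h4 : PySem.Str.isIn "spinoff" s
        case true => simp_all [pvKeywordPriority]
        case false =>
          cases h5 : PySem.Str.isIn "buyback" s
          case true => simp_all [pvKeywordPriority]
          case false =>
            cases h6 : PySem.Str.isIn "delisting" s
            case true => simp_all [pvKeywordPriority]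
            case false =>
              cases h7 : PySem.Str.isIn "rights" s
              case true => simp_all [pvKeywordPriority]
              case false =>
                cases h8 : PySem.Str.isIn "preferential" s
                case true => simp_all [pvKeywordPriority]
                case false =>
                  cases h9 : PySem.Str.isIn "qip" s
                  case true => simp_all [pvKeywordPriority]
                  case false =>
                    cases h10 : PySem.Str.isIn "nclt" s
                    case true => simp_all [pvKeywordPriority]
                    case false =>
                      simp_all [pvKeywordPriority]

-- ===== VERDICT =====
theorem classify_announcement_py_spec : Claim_equal_classify_announcement_py := by
  intro announcement _
  unfold Spec_classify_announcement_py classify_announcement_py classify_announcement_py_alt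
  exact ladder_eq_fold _
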